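-- pv_equiv track=rewrite | github.com/mariasilviamorlino/python_practice | coordinates_handling.py | make_bins
-- ===== SOURCE A (Python) =====
-- chr_lengths_dict = dict()
--
-- def make_bins(bin_width, chr_lengths=chr_lengths_dict):
--     """defines start and end of the bins given the total length of each chr and a width
--     return dict {chr1: [(1-100000), (100001-200000), ...]}"""
--     bins_dict = dict()
--     for chromosome in chr_lengths.keys():
--         chr_length = chr_lengths[chromosome]
--         start = 1
--         end = bin_width
--         chr_bins = list()
--         while start < chr_length and end < chr_length:
--             chr_bins.append((start, end))
--             start = end + 1
--             end = end + bin_width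
--         # append the "leftover" interval (probably not necessary to check for end >= chr_length)
--         if end >= chr_length:
--             chr_bins.append((start, chr_length))
--         bins_dict[chromosome] = chr_bins
--     return bins_dict
-- ===== SOURCE B (Python) =====
-- chr_lengths_dict = dict()
--
-- def make_bins(bin_width, chr_lengths=chr_lengths_dict):
--     """Boundary-list formulation: for each chromosome build the list of cut
--     points [0, bin_width, 2*bin_width, ... (< chr_length), chr_length] and pair
--     adjacent cut points into (lo+1, hi) intervals."""
--     def intervals(chr_length):
--         cuts = [0] + list(range(bin_width, chr_length, bin_width)) + [chr_length]
--         return [(lo + 1, hi) for lo, hi in zip(cuts, cuts[1:])]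
--     return {chromosome: intervals(chr_length)
--             for chromosome, chr_length in chr_lengths.items()}
-- ===== Notes on version B (the rewrite author's own statement) =====
-- stated objective: simpler
-- what changed: Replaces A's stateful (start,end) while-loop with its trailing leftover special case by a boundary-list formulation: build the list of cut points [0, bw, 2bw, ... , chr_length] and zip adjacent cut points into intervals, with no leftover branch.
-- outside the precondition, e.g. on make_bins(0, {'c': 0}): A returns {'c': [(1, 0)]}, B raises ValueError; on make_bins(-1, {'c': 0}): A returns {'c': []}, B returns {'c': [(1, 0)]}
import Mathlib
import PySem

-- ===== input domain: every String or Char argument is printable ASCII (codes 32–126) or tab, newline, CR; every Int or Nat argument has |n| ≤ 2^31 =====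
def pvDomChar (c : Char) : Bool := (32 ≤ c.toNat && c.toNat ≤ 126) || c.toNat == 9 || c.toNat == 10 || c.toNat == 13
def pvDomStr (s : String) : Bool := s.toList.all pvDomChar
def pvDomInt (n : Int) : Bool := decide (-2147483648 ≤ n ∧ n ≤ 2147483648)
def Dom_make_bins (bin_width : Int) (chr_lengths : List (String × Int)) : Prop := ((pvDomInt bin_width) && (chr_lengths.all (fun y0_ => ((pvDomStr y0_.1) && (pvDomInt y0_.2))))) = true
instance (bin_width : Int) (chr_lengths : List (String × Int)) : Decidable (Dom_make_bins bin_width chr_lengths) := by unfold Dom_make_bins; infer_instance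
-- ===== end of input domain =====

-- B replaces A's incremental (start, end)-state while-loop and its leftover special
-- case by a boundary-list formulation: build the list of cut points and pair adjacent
-- cut points (objective: simpler).

-- ===== PORT A =====
-- the while-loop of A: state (start, end, chr_bins); fuel only makes it total
-- (chr_length.toNat + 1 steps always suffice when bin_width ≥ 1, i.e. inside Pre_)
def pvAWhile (bin_width chr_length : Int) :
    Nat → Int → Int → List (Int × Int) → Int × Int × List (Int × Int)
  | 0, start, e, acc => (start, e, acc)
  | fuel + 1, start, e, acc =>
    if start < chr_length ∧ e < chr_length then
      pvAWhile bin_width chr_length fuel (e + 1) (e + bin_width) (acc ++ [(start, e)])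
    else (start, e, acc)

-- body of A's for-loop for one chromosome length
def pvAChr (bin_width chr_length : Int) : List (Int × Int) :=
  let r := pvAWhile bin_width chr_length (chr_length.toNat + 1) 1 bin_width []
  if r.2.1 ≥ chr_length then r.2.2 ++ [(r.1, chr_length)] else r.2.2

def make_bins (bin_width : Int) (chr_lengths : List (String × Int)) : List (String × List (Int × Int)) :=
  let d : PySem.Dict String Int := PySem.Dict.mk chr_lengths
  (d.keys.foldl
    (fun (bins_dict : PySem.Dict String (List (Int × Int))) chromosome =>
      bins_dict.insert chromosome (pvAChr bin_width (d.getD chromosome 0)))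
    PySem.Dict.empty).items

-- ===== PORT B =====
-- B's nested helper: cut points [0] + range(bin_width, chr_length, bin_width) + [chr_length],
-- then pair adjacent cut points (cuts[1:] is PySem.List.slice cuts 1 none, zip is List.zip)
def pvBChr (bin_width chr_length : Int) : List (Int × Int) :=
  let cuts := [0] ++ PySem.List.pyRange bin_width chr_length bin_width ++ [chr_length]
  (cuts.zip (PySem.List.slice cuts (some 1) none)).map (fun p => (p.1 + 1, p.2))

def make_bins_alt (bin_width : Int) (chr_lengths : List (String × Int)) : List (String × List (Int × Int)) :=
  (chr_lengths.foldl
    (fun (bins_dict : PySem.Dict String (List (Int × Int))) p =>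
      bins_dict.insert p.1 (pvBChr bin_width p.2))
    PySem.Dict.empty).items

-- ===== PRECONDITION & SPEC =====
-- Pre_ excludes bin_width ≤ 0, on which A loops forever for any chr_length ≥ 2 and B's
-- range step is invalid (bin_width = 0, ValueError) or counts down and disagrees, and
-- association lists with duplicate keys, which do not represent a Python dict.
def Pre_make_bins (bin_width : Int) (chr_lengths : List (String × Int)) : Prop :=
  1 ≤ bin_width ∧ (chr_lengths.map Prod.fst).Nodup
instance (bin_width : Int) (chr_lengths : List (String × Int)) : Decidable (Pre_make_bins bin_width chr_lengths) := by unfold Pre_make_bins; infer_instance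

def pvWitness_make_bins : Int × (List (String × Int)) := (3, [("chr1", 7), ("chr2", 0)])

def Spec_make_bins (bin_width : Int) (chr_lengths : List (String × Int)) (out : List (String × List (Int × Int))) : Prop := out = make_bins_alt bin_width chr_lengths
instance (bin_width : Int) (chr_lengths : List (String × Int)) (out : List (String × List (Int × Int))) : Decidable (Spec_make_bins bin_width chr_lengths out) := by unfold Spec_make_bins; infer_instance

-- ===== CLAIM (what is proved, stated in full; the proofs are below) =====
def Claim_equal_make_bins : Prop := ∀ (bin_width : Int) (chr_lengths : List (String × Int)), Dom_make_bins bin_width chr_lengths → Pre_make_bins bin_width chr_lengths → Spec_make_bins bin_width chr_lengths (make_bins bin_width chr_lengths)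

-- ===== LEMMAS AND PROOFS =====

-- C := ceil(L / bw); the bracket (C-1)*bw < L ≤ C*bw
theorem pv_ceil_bracket (bw L : Int) (hbw : 1 ≤ bw) :
    (-(PySem.Int.floordiv (-L) bw) - 1) * bw < L ∧ L ≤ -(PySem.Int.floordiv (-L) bw) * bw := by
  have h := (PySem.Int.neg_floordiv_neg_eq_iff_of_pos (a := L) (b := bw)
    (q := -(PySem.Int.floordiv (-L) bw)) (by omega)).mp rfl
  omega

-- at full-bin index N the while-loop condition fails
theorem pv_stop (bw L N : Int) (hbw : 1 ≤ bw)
    (hN : N = max 0 (-(PySem.Int.floordiv (-L) bw) - 1)) :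
    ¬ (N * bw + 1 < L ∧ (N + 1) * bw < L) := by
  obtain ⟨hb1, hb2⟩ := pv_ceil_bracket bw L hbw
  have h1 : -(PySem.Int.floordiv (-L) bw) - 1 ≤ N := hN ▸ le_max_right _ _
  rintro ⟨-, h2⟩
  nlinarith [mul_le_mul_of_nonneg_right (by omega : -(PySem.Int.floordiv (-L) bw) ≤ N + 1) (by omega : (0:Int) ≤ bw)]

-- the loop invariant: starting at full-bin index k ≤ N with enough fuel, the while loop
-- runs to index N and appends exactly the full bins k, k+1, …, N-1
theorem pvAWhile_run (bw L : Int) (hbw : 1 ≤ bw) (N : Int)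
    (hN : N = max 0 (-(PySem.Int.floordiv (-L) bw) - 1)) :
    ∀ (fuel : Nat) (k : Int) (acc : List (Int × Int)),
      0 ≤ k → k ≤ N → (N - k).toNat ≤ fuel →
      pvAWhile bw L fuel (k * bw + 1) ((k + 1) * bw) acc
        = (N * bw + 1, (N + 1) * bw,
           acc ++ (PySem.List.pyRange k N 1).map
             (fun i => (i * bw + 1, (i + 1) * bw))) := by
  obtain ⟨hb1, hb2⟩ := pv_ceil_bracket bw L hbw
  intro fuel
  induction fuel with
  | zero =>
    intro k acc hk0 hkN hfuel
    have hkN' : k = N := by omega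
    subst hkN'
    simp [pvAWhile, PySem.List.pyRange]
  | succ n ih =>
    intro k acc hk0 hkN hfuel
    rcases eq_or_lt_of_le hkN with hkN' | hlt
    · subst hkN'
      simp [pvAWhile, pv_stop bw L k hbw hN, PySem.List.pyRange]
    · -- k < N: the loop condition holds
      have hkC : k + 1 ≤ -(PySem.Int.floordiv (-L) bw) - 1 := by
        rcases max_choice 0 (-(PySem.Int.floordiv (-L) bw) - 1) with hm | hm <;> omega
      have hend : (k + 1) * bw < L := by
        nlinarith [mul_le_mul_of_nonneg_right (by omega : k + 1 ≤ -(PySem.Int.floordiv (-L) bw) - 1) (by omega : (0:Int) ≤ bw)]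
      have hstart : k * bw + 1 < L := by nlinarith
      have hcond : (k : Int) * bw + 1 < L ∧ (k + 1) * bw < L := ⟨hstart, hend⟩
      have hrec := ih (k + 1) (acc ++ [(k * bw + 1, (k + 1) * bw)]) (by omega) (by omega) (by omega)
      have hrange := PySem.List.pyRange_one_cons (a := k) (b := N) hlt
      simp only [pvAWhile, if_pos hcond]
      have hstep : (k + 1) * bw + bw = ((k + 1) + 1) * bw := by ring
      rw [hstep, hrec, hrange]
      simp [List.append_assoc]

-- one chromosome of A: closed form, full bins 0..N-1 plus the leftover, N = max 0 (ceil-1)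
theorem pvAChr_closed (bw L : Int) (hbw : 1 ≤ bw) :
    pvAChr bw L
      = (PySem.List.pyRange 0 (max 0 (-(PySem.Int.floordiv (-L) bw) - 1)) 1).map
          (fun i => (i * bw + 1, (i + 1) * bw))
        ++ [(max 0 (-(PySem.Int.floordiv (-L) bw) - 1) * bw + 1, L)] := by
  obtain ⟨hb1, hb2⟩ := pv_ceil_bracket bw L hbw
  set C := -(PySem.Int.floordiv (-L) bw) with hC
  set N := max 0 (C - 1) with hN
  have hN0 : 0 ≤ N := le_max_left _ _
  have hfuel : (N - 0).toNat ≤ L.toNat + 1 := by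
    rcases max_choice 0 (C - 1) with hm | hm <;> rw [← hN] at hm
    · omega
    · have h1 : C - 1 ≤ (C - 1) * bw := by nlinarith
      omega
  have hrun := pvAWhile_run bw L hbw N hN (L.toNat + 1) 0 [] le_rfl hN0 hfuel
  have hCN : C - 1 ≤ N := le_max_right _ _
  have hge : (N + 1) * bw ≥ L := by
    nlinarith [mul_le_mul_of_nonneg_right (by omega : C ≤ N + 1) (by omega : (0:Int) ≤ bw)]
  rw [show (0:Int) * bw + 1 = 1 by ring, show ((0:Int) + 1) * bw = bw by ring] at hrun
  unfold pvAChr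
  rw [hrun]
  simp [hge]

-- pairing adjacent elements of a boundary list (pure list fact used for B)
theorem pv_pairs (f : Int × Int → Int × Int) :
    ∀ (n : Nat) (e : Nat → Int) (L : Int),
      ((((List.range (n + 1)).map e ++ [L]).zip
          (((List.range (n + 1)).map e ++ [L]).tail)).map f)
        = (List.range n).map (fun k => f (e k, e (k + 1))) ++ [f (e n, L)] := by
  intro n
  induction n with
  | zero => intro e L; simp [List.range_succ]
  | succ n ih =>
    intro e L
    have hcons : ((List.range (n + 1)).map (e ∘ Nat.succ) ++ [L]) =
        e 1 :: ((List.range n).map (e ∘ Nat.succ ∘ Nat.succ) ++ [L]) := by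
      rw [List.range_succ_eq_map (n := n)]; simp [Function.comp]
    have ihs := ih (e ∘ Nat.succ) L
    rw [hcons] at ihs
    simp only [List.tail_cons] at ihs
    rw [List.range_succ_eq_map (n := n + 1), List.map_cons, List.map_map,
        List.cons_append, List.tail_cons, hcons, List.zip_cons_cons, List.map_cons, ihs,
        List.range_succ_eq_map (n := n), List.map_cons, List.map_map]
    simp [Function.comp]

-- B's cut-point count equals A's full-bin count
theorem pv_count_eq (bw L : Int) (hbw : 1 ≤ bw) :
    ((if bw < L then ((L - bw + bw - 1) / bw).toNat else 0 : Nat) : Int)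
      = max 0 (-(PySem.Int.floordiv (-L) bw) - 1) := by
  obtain ⟨hb1, hb2⟩ := pv_ceil_bracket bw L hbw
  set C := -(PySem.Int.floordiv (-L) bw) with hC
  split_ifs with h
  · -- bw < L: count is floor((L-1)/bw) = C - 1 ≥ 1
    have hC2 : 2 ≤ C := by nlinarith
    have hfd : PySem.Int.floordiv (L - 1) bw = C - 1 := by
      rw [PySem.Int.floordiv_eq_iff_of_pos (by omega)]
      constructor <;> nlinarith
    have he : (L - bw + bw - 1) / bw = C - 1 := by
      rw [show L - bw + bw - 1 = L - 1 by ring,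
          ← PySem.Int.floordiv_eq_ediv_of_pos (a := L - 1) (b := bw) (by omega), hfd]
    rw [he]
    omega
  · -- L ≤ bw: C ≤ 1, so the max is 0
    have : C ≤ 1 := by nlinarith
    omega

-- one chromosome: B's boundary pairing equals A's closed form
theorem pvBChr_closed (bw L : Int) (hbw : 1 ≤ bw) :
    pvBChr bw L
      = (PySem.List.pyRange 0 (max 0 (-(PySem.Int.floordiv (-L) bw) - 1)) 1).map
          (fun i => (i * bw + 1, (i + 1) * bw))
        ++ [(max 0 (-(PySem.Int.floordiv (-L) bw) - 1) * bw + 1, L)] := by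
  set N := max 0 (-(PySem.Int.floordiv (-L) bw) - 1) with hN
  set n : Nat := if bw < L then ((L - bw + bw - 1) / bw).toNat else 0 with hn
  have hnN : (n : Int) = N := hN ▸ hn ▸ pv_count_eq bw L hbw
  have hr : PySem.List.pyRange bw L bw
      = (List.range n).map (fun (k : Nat) => bw + bw * (k : Int)) := by
    rw [PySem.List.pyRange_of_pos bw L (by omega), hn]
  have hcuts : [0] ++ PySem.List.pyRange bw L bw ++ [L]
      = (List.range (n + 1)).map (fun k => ((k : Nat) : Int) * bw) ++ [L] := by
    rw [hr, List.range_succ_eq_map (n := n), List.map_cons, List.map_map]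
    simp only [Nat.cast_zero, zero_mul, List.cons_append, List.nil_append]
    congr 2
    apply List.map_congr_left
    intro k _
    simp only [Function.comp_apply, Nat.succ_eq_add_one]
    push_cast
    ring
  simp only [pvBChr]
  rw [PySem.List.slice_from_one, hcuts,
      pv_pairs (fun p => (p.1 + 1, p.2)) n (fun k => ((k : Nat) : Int) * bw) L]
  rw [PySem.List.pyRange_one, show (N - 0 : Int) = N by ring, ← hnN, Int.toNat_natCast,
      List.map_map]
  congr 1
  · apply List.map_congr_left
    intro k _
    simp only [Function.comp_apply]
    push_cast
    ring_nf

-- the two per-chromosome bodies agree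
theorem pvChr_eq (bw L : Int) (hbw : 1 ≤ bw) : pvAChr bw L = pvBChr bw L := by
  rw [pvAChr_closed bw L hbw, pvBChr_closed bw L hbw]

-- the dict-building folds: under Nodup keys both items lists are the per-entry maps
theorem make_bins_items (bw : Int) (chrs : List (String × Int))
    (hnd : (chrs.map Prod.fst).Nodup) :
    make_bins bw chrs
      = chrs.map (fun p => (p.1, pvAChr bw ((PySem.Dict.mk chrs).getD p.1 0))) := by
  unfold make_bins
  have hkeys : (PySem.Dict.mk chrs).keys = chrs.map Prod.fst := rfl
  rw [PySem.Dict.items_foldl_insert_fresh _ _ _ _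
      (by intro a _; exact PySem.Dict.contains_empty a) (by rw [List.map_id']; exact hkeys ▸ hnd)]
  simp [PySem.Dict.empty, hkeys, List.map_map, Function.comp_def]

theorem make_bins_alt_items (bw : Int) (chrs : List (String × Int))
    (hnd : (chrs.map Prod.fst).Nodup) :
    make_bins_alt bw chrs = chrs.map (fun p => (p.1, pvBChr bw p.2)) := by
  unfold make_bins_alt
  rw [PySem.Dict.items_foldl_insert_fresh _ _ _ _
      (by intro a _; exact PySem.Dict.contains_empty a.1) hnd]
  simp [PySem.Dict.empty]

-- ===== VERDICT (by name: the statement is the Claim_ definition above) =====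
theorem make_bins_spec : Claim_equal_make_bins := by
  intro bw chrs _ hpre
  obtain ⟨hbw, hnd⟩ := hpre
  unfold Spec_make_bins
  rw [make_bins_items bw chrs hnd, make_bins_alt_items bw chrs hnd]
  apply List.map_congr_left
  intro p hp
  have hget : (PySem.Dict.mk chrs).getD p.1 0 = p.2 :=
    PySem.Dict.getD_of_mem_items (d := PySem.Dict.mk chrs)
      (show (p.1, p.2) ∈ (PySem.Dict.mk chrs).items by simpa using hp) hnd 0
  rw [hget, pvChr_eq bw p.2 hbw]
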